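-- pv_equiv track=rewrite | github.com/shezzy7/Java | problem_6.py | min_hops
-- ===== SOURCE A (Python) =====
-- from collections import defaultdict,deque
--
-- def min_hops(n,routes,source,dest):
--     if source==dest:
--         return 0
--
--     stop_routes=defaultdict(set)
--     for i,route in enumerate(routes):
--         for stop in route:
--             stop_routes[stop].add(i)
--
--     vis_routes=set()
--     vis_stops=set()
--     q=deque()
--
--     for i in stop_routes[source]:
--         q.append((i,1))
--         vis_routes.add(i)
--
--     while q:
--         idx,hop=q.popleft()
--         if dest in routes[idx]:
--             return hop
--         for stop in routes[idx]:
--             if stop in vis_stops: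
--                 continue
--             vis_stops.add(stop)
--             for nei in stop_routes[stop]:
--                 if nei not in vis_routes:
--                     vis_routes.add(nei)
--                     q.append((nei,hop+1))
--     return -1
-- ===== SOURCE B (Python) =====
-- def min_hops(n, routes, source, dest):
--     if source == dest:
--         return 0
--     frontier = [i for i, r in enumerate(routes) if source in r]
--     seen = list(frontier)
--     buses = 1
--     for _ in range(len(routes)):
--         if not frontier:
--             break
--         if any(dest in routes[i] for i in frontier):
--             return buses
--         nxt = [j for j, r in enumerate(routes)
--                if j not in seen and any(s in r for i in frontier for s in routes[i])]
--         seen += nxt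
--         frontier = nxt
--         buses += 1
--     return -1
-- ===== Notes on version B (the rewrite author's own statement) =====
-- stated objective: alternative
-- what changed: Replaced the route-by-route deque BFS with an explicit stop->routes index and visited-stop pruning by a level-synchronized BFS: each round scans all routes once for one sharing a stop with the current frontier, keeping only a frontier list and a seen list (no dict, no queue, no visited-stops set).
import Mathlib
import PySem

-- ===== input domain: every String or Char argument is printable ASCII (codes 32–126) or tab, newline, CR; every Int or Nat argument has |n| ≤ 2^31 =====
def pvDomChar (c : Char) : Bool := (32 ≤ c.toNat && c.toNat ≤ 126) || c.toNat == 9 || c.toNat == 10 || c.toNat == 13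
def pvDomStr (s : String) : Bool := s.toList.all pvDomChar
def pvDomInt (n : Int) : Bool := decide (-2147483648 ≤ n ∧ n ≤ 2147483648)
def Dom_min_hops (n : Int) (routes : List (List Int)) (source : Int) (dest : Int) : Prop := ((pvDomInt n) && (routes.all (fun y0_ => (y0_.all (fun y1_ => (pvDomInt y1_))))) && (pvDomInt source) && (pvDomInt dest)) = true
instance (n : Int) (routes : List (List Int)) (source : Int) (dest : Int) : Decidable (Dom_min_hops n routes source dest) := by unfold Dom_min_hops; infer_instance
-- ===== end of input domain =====

-- B replaces A's stop→routes index + deque BFS over routes by a level-synchronized BFS that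
-- rescans the route list each round for unseen routes sharing a stop with the current frontier
-- (no stop→routes dict, no queue, no visited-stops set); objective: alternative.

-- ===== PORT A =====
-- stop_routes = defaultdict(set); for i, route in enumerate(routes): for stop in route: stop_routes[stop].add(i)
def pvSR (routes : List (List Int)) : PySem.Dict Int (PySem.Set Int) :=
  (PySem.List.enumerate routes 0).foldl
    (fun d p => p.2.foldl (fun d stop => d.modify stop PySem.Set.empty (fun s => PySem.Set.add s p.1)) d)
    PySem.Dict.empty

-- for nei in stop_routes[stop]: if nei not in vis_routes: vis_routes.add(nei); q.append((nei, hop + 1))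
def pvStepNei (hop : Int) (st : List (Int × Int) × PySem.Set Int) (nei : Int) :
    List (Int × Int) × PySem.Set Int :=
  if nei ∈ st.2 then st else (st.1 ++ [(nei, hop + 1)], PySem.Set.add st.2 nei)

-- for stop in routes[idx]: if stop in vis_stops: continue; vis_stops.add(stop); <inner nei loop>
def pvStepStop (sr : PySem.Dict Int (PySem.Set Int)) (hop : Int)
    (st : List (Int × Int) × PySem.Set Int × PySem.Set Int) (stop : Int) :
    List (Int × Int) × PySem.Set Int × PySem.Set Int :=
  if stop ∈ st.2.2 then st
  else
    let visS := PySem.Set.add st.2.2 stop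
    let qr := (sr.getD stop PySem.Set.empty).foldl (pvStepNei hop) (st.1, st.2.1)
    (qr.1, qr.2, visS)

-- while q: idx, hop = q.popleft(); …  (fuel = routes.length is a pure totality guard: every
-- enqueued index is a fresh addition to vis_routes, so at most routes.length dequeues occur;
-- routes[idx] is ported total as pyGetD since enqueued indices come from enumerate and are in range)
def pvLoopA (routes : List (List Int)) (sr : PySem.Dict Int (PySem.Set Int)) (dest : Int) :
    Nat → List (Int × Int) → PySem.Set Int → PySem.Set Int → Int
  | _, [], _, _ => -1
  | 0, _ :: _, _, _ => -1
  | fuel + 1, (idx, hop) :: rest, visR, visS =>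
    if dest ∈ PySem.List.pyGetD routes idx [] then hop
    else
      let st := (PySem.List.pyGetD routes idx []).foldl (pvStepStop sr hop) (rest, visR, visS)
      pvLoopA routes sr dest fuel st.1 st.2.1 st.2.2

def min_hops (n : Int) (routes : List (List Int)) (source : Int) (dest : Int) : Int :=
  if source = dest then 0
  else
    let sr := pvSR routes
    let init := (sr.getD source PySem.Set.empty).foldl
      (fun (st : List (Int × Int) × PySem.Set Int) i => (st.1 ++ [(i, 1)], PySem.Set.add st.2 i))
      ([], PySem.Set.empty)
    pvLoopA routes sr dest routes.length init.1 init.2 PySem.Set.empty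

-- ===== PORT B =====
-- nxt = [j for j, r in enumerate(routes) if j not in seen and any(s in r for i in frontier for s in routes[i])]
def pvNext (routes : List (List Int)) (frontier seen : List Int) : List Int :=
  ((PySem.List.enumerate routes 0).filter
    (fun p => !(decide (p.1 ∈ seen)) &&
      frontier.any (fun i => (PySem.List.pyGetD routes i []).any (fun s => decide (s ∈ p.2))))).map (·.1)

-- for _ in range(len(routes)): if not frontier: break; if any(dest in routes[i] for i in frontier): return buses; …
-- (the range(len(routes)) counter is the fuel argument; exhausting it returns -1 like Python's final return)
def pvLoopB (routes : List (List Int)) (dest : Int) :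
    Nat → List Int → List Int → Int → Int
  | 0, _, _, _ => -1
  | f + 1, frontier, seen, buses =>
    if frontier.isEmpty then -1
    else if frontier.any (fun i => decide (dest ∈ PySem.List.pyGetD routes i [])) then buses
    else
      let nxt := pvNext routes frontier seen
      pvLoopB routes dest f nxt (seen ++ nxt) (buses + 1)

def min_hops_alt (n : Int) (routes : List (List Int)) (source : Int) (dest : Int) : Int :=
  if source = dest then 0
  else
    let frontier := ((PySem.List.enumerate routes 0).filter (fun p => decide (source ∈ p.2))).map (·.1)
    pvLoopB routes dest routes.length frontier frontier 1

-- ===== PRECONDITION & SPEC =====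
def Spec_min_hops (n : Int) (routes : List (List Int)) (source : Int) (dest : Int) (out : Int) : Prop := out = min_hops_alt n routes source dest
instance (n : Int) (routes : List (List Int)) (source : Int) (dest : Int) (out : Int) : Decidable (Spec_min_hops n routes source dest out) := by unfold Spec_min_hops; infer_instance

-- ===== CLAIM (what is proved, stated in full; the proofs are below) =====
def Claim_equal_min_hops : Prop := ∀ (n : Int) (routes : List (List Int)) (source : Int) (dest : Int), Dom_min_hops n routes source dest → Spec_min_hops n routes source dest (min_hops n routes source dest)

-- ===== LEMMAS AND PROOFS =====

-- j is (the Int cast of) a route index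
def pvValid (routes : List (List Int)) (j : Int) : Prop :=
  ∃ k : Nat, k < routes.length ∧ j = (k : Int)

-- routes[j], total form (only ever used at in-range j)
def pvR (routes : List (List Int)) (j : Int) : List Int := PySem.List.pyGetD routes j []

-- visited-stop closure: every route through a visited stop is already a visited route
def pvClosed (routes : List (List Int)) (visS visR : PySem.Set Int) : Prop :=
  ∀ s j, s ∈ visS → pvValid routes j → s ∈ pvR routes j → j ∈ visR

theorem inner_sr (i : Int) : ∀ (r : List Int) (d : PySem.Dict Int (PySem.Set Int)) (s j : Int),
    j ∈ (r.foldl (fun d stop => d.modify stop PySem.Set.empty (fun t => PySem.Set.add t i)) d).getD s PySem.Set.empty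
      ↔ j ∈ d.getD s PySem.Set.empty ∨ (j = i ∧ s ∈ r) := by
  intro r
  induction r with
  | nil => simp
  | cons stop rest ih =>
    intro d s j
    simp only [List.foldl_cons, ih, PySem.Dict.getD_modify]
    by_cases h : s = stop
    · subst h
      simp [PySem.Set.mem_add]
      tauto
    · simp [h]

theorem outer_sr (s j : Int) : ∀ (l : List (Int × List Int)) (d : PySem.Dict Int (PySem.Set Int)),
    j ∈ (l.foldl (fun d p => p.2.foldl (fun d stop => d.modify stop PySem.Set.empty (fun t => PySem.Set.add t p.1)) d) d).getD s PySem.Set.empty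
      ↔ j ∈ d.getD s PySem.Set.empty ∨ ∃ p ∈ l, j = p.1 ∧ s ∈ p.2 := by
  intro l
  induction l with
  | nil => simp
  | cons p rest ih =>
    intro d
    simp only [List.foldl_cons, ih, inner_sr]
    simp
    tauto

theorem mem_pvSR (routes : List (List Int)) (s j : Int) :
    j ∈ (pvSR routes).getD s PySem.Set.empty ↔ pvValid routes j ∧ s ∈ pvR routes j := by
  unfold pvSR
  rw [outer_sr]
  simp only [PySem.Dict.getD_empty]
  constructor
  · rintro (h | ⟨p, hp, rfl, hs⟩)
    · simp [PySem.Set.empty] at h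
    · rcases (PySem.List.mem_enumerate_iff _ _ _).1 hp with ⟨k, hk, hpk⟩
      refine ⟨⟨k, hk, by simp [hpk]⟩, ?_⟩
      simp [pvR, hpk] at hs ⊢
      simpa [PySem.List.pyGetD_natCast, List.getD, hk] using hs
  · rintro ⟨⟨k, hk, rfl⟩, hs⟩
    right
    refine ⟨((k : Int), routes[k]), ?_, rfl, ?_⟩
    · exact (PySem.List.mem_enumerate_iff _ _ _).2 ⟨k, hk, by simp⟩
    · simpa [pvR, PySem.List.pyGetD_natCast, List.getD, hk] using hs

theorem nodup_inner_sr (i : Int) : ∀ (r : List Int) (d : PySem.Dict Int (PySem.Set Int)),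
    (∀ s, (d.getD s PySem.Set.empty).Nodup) →
    ∀ s, ((r.foldl (fun d stop => d.modify stop PySem.Set.empty (fun t => PySem.Set.add t i)) d).getD s PySem.Set.empty).Nodup := by
  intro r
  induction r with
  | nil => intro d h s; simpa using h s
  | cons stop rest ih =>
    intro d h s
    refine ih _ (fun s' => ?_) s
    rw [PySem.Dict.getD_modify]
    split_ifs with hs
    · exact PySem.Set.nodup_add _ _ (h stop)
    · exact h s'

theorem nodup_pvSR (routes : List (List Int)) (s : Int) :
    ((pvSR routes).getD s PySem.Set.empty).Nodup := by
  unfold pvSR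
  have : ∀ (l : List (Int × List Int)) (d : PySem.Dict Int (PySem.Set Int)),
      (∀ s, (d.getD s PySem.Set.empty).Nodup) →
      ∀ s, ((l.foldl (fun d p => p.2.foldl (fun d stop => d.modify stop PySem.Set.empty (fun t => PySem.Set.add t p.1)) d) d).getD s PySem.Set.empty).Nodup := by
    intro l
    induction l with
    | nil => intro d h s; simpa using h s
    | cons p rest ih =>
      intro d h s
      exact ih _ (nodup_inner_sr p.1 p.2 d h) s
  exact this _ _ (fun s => by simp [PySem.Set.empty]) s

theorem init_fold_gen : ∀ (l : List Int) (q0 : List (Int × Int)) (v0 : PySem.Set Int),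
    (∀ i ∈ l, i ∉ v0) → l.Nodup →
    l.foldl (fun (st : List (Int × Int) × PySem.Set Int) i =>
        (st.1 ++ [(i, 1)], PySem.Set.add st.2 i)) (q0, v0)
      = (q0 ++ l.map (fun i => (i, (1 : Int))), v0 ++ l) := by
  intro l
  induction l with
  | nil => simp
  | cons x rest ih =>
    intro q0 v0 hdis hnd
    simp only [List.foldl_cons]
    rw [PySem.Set.add_of_not_mem (hdis x (by simp))]
    rw [ih (q0 ++ [(x, 1)]) (v0 ++ [x])
      (fun i hi => by
        simp only [List.mem_append, List.mem_singleton]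
        rintro (h | rfl)
        · exact hdis i (by simp [hi]) h
        · exact (List.nodup_cons.1 hnd).1 hi)
      (List.nodup_cons.1 hnd).2]
    simp

theorem init_fold (l : List Int) (hnd : l.Nodup) :
    l.foldl (fun (st : List (Int × Int) × PySem.Set Int) i =>
        (st.1 ++ [(i, 1)], PySem.Set.add st.2 i)) ([], PySem.Set.empty)
      = (l.map (fun i => (i, (1 : Int))), l) := by
  simpa using init_fold_gen l [] [] (by simp) hnd

theorem nei_fold (hop : Int) : ∀ (l : List Int) (q0 : List (Int × Int)) (v0 : PySem.Set Int),
    ∃ a : List (Int × Int),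
      l.foldl (pvStepNei hop) (q0, v0) = (q0 ++ a, v0 ++ a.map (·.1)) ∧
      (∀ j, j ∈ v0 ++ a.map (·.1) ↔ j ∈ v0 ∨ j ∈ l) ∧
      (∀ p ∈ a, p.2 = hop + 1) ∧
      (v0.Nodup → (v0 ++ a.map (·.1)).Nodup) := by
  intro l
  induction l with
  | nil => exact fun q0 v0 => ⟨[], by simp⟩
  | cons x rest ih =>
    intro q0 v0
    simp only [List.foldl_cons, pvStepNei]
    by_cases hx : x ∈ v0
    · simp only [if_pos hx]
      obtain ⟨a, heq, hmem, hhop, hnd⟩ := ih q0 v0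
      refine ⟨a, heq, fun j => ?_, hhop, hnd⟩
      rw [hmem]
      constructor
      · rintro (h | h)
        · exact Or.inl h
        · exact Or.inr (List.mem_cons_of_mem _ h)
      · rintro (h | h)
        · exact Or.inl h
        · rcases List.mem_cons.1 h with rfl | h'
          · exact Or.inl hx
          · exact Or.inr h'
    · simp only [if_neg hx]
      rw [PySem.Set.add_of_not_mem hx]
      obtain ⟨a, heq, hmem, hhop, hnd⟩ := ih (q0 ++ [(x, hop + 1)]) (v0 ++ [x])
      refine ⟨(x, hop + 1) :: a, ?_, ?_, ?_, ?_⟩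
      · simpa using heq
      · intro j
        have := hmem j
        simp only [List.mem_append, List.mem_singleton] at this ⊢
        simp only [List.map_cons, List.mem_cons] at *
        tauto
      · intro p hp
        rcases List.mem_cons.1 hp with rfl | hp'
        · rfl
        · exact hhop p hp'
      · intro h0
        have h1 := hnd (by
          simp [List.nodup_append, h0]
          intro a ha heq
          exact hx (heq ▸ ha))
        simp only [List.map_cons]
        rw [← List.singleton_append, ← List.append_assoc]
        exact h1

theorem one_stop (routes : List (List Int)) (hop stop : Int)
    (q0 : List (Int × Int)) (visR visS : PySem.Set Int)
    (hnd : visR.Nodup) (hcl : pvClosed routes visS visR) :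
    ∃ (a : List (Int × Int)) (visS' : PySem.Set Int),
      pvStepStop (pvSR routes) hop (q0, visR, visS) stop = (q0 ++ a, visR ++ a.map (·.1), visS') ∧
      (∀ j, j ∈ visR ++ a.map (·.1) ↔ j ∈ visR ∨ (pvValid routes j ∧ stop ∈ pvR routes j)) ∧
      (∀ p ∈ a, p.2 = hop + 1) ∧
      (visR ++ a.map (·.1)).Nodup ∧
      pvClosed routes visS' (visR ++ a.map (·.1)) := by
  unfold pvStepStop
  by_cases hs : stop ∈ visS
  · refine ⟨[], visS, by simp [hs], ?_, by simp, by simpa using hnd, by simpa using hcl⟩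
    intro j
    simp only [List.map_nil, List.append_nil]
    constructor
    · exact Or.inl
    · rintro (h | ⟨hv, hin⟩)
      · exact h
      · exact hcl stop j hs hv hin
  · simp only [if_neg hs]
    obtain ⟨a, heq, hmem, hhop, hndf⟩ := nei_fold hop ((pvSR routes).getD stop PySem.Set.empty) q0 visR
    refine ⟨a, PySem.Set.add visS stop, by simp only [heq], ?_, hhop, hndf hnd, ?_⟩
    · intro j
      rw [hmem j]
      simp only [mem_pvSR]
    · intro s j hsv hv hin
      rw [PySem.Set.mem_add] at hsv
      rcases hsv with h | rfl
      · exact List.mem_append_left _ (hcl s j h hv hin)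
      · exact (hmem j).2 (Or.inr ((mem_pvSR routes s j).2 ⟨hv, hin⟩))

theorem proc_route (routes : List (List Int)) (hop : Int) : ∀ (r : List Int)
    (q0 : List (Int × Int)) (visR visS : PySem.Set Int),
    visR.Nodup → pvClosed routes visS visR →
    ∃ (a : List (Int × Int)) (visS' : PySem.Set Int),
      r.foldl (pvStepStop (pvSR routes) hop) (q0, visR, visS) = (q0 ++ a, visR ++ a.map (·.1), visS') ∧
      (∀ j, j ∈ visR ++ a.map (·.1) ↔ j ∈ visR ∨ (pvValid routes j ∧ ∃ s ∈ r, s ∈ pvR routes j)) ∧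
      (∀ p ∈ a, p.2 = hop + 1) ∧
      (visR ++ a.map (·.1)).Nodup ∧
      pvClosed routes visS' (visR ++ a.map (·.1)) := by
  intro r
  induction r with
  | nil => exact fun q0 visR visS hnd hcl => ⟨[], visS, by simp, by simp, by simp, by simpa using hnd, by simpa using hcl⟩
  | cons stop rest ih =>
    intro q0 visR visS hnd hcl
    obtain ⟨a1, visS1, heq1, hmem1, hhop1, hnd1, hcl1⟩ := one_stop routes hop stop q0 visR visS hnd hcl
    obtain ⟨a2, visS2, heq2, hmem2, hhop2, hnd2, hcl2⟩ := ih (q0 ++ a1) (visR ++ a1.map (·.1)) visS1 hnd1 hcl1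
    refine ⟨a1 ++ a2, visS2, ?_, ?_, ?_, ?_, ?_⟩
    · rw [List.foldl_cons, heq1, heq2]
      simp [List.append_assoc]
    · intro j
      have h2 := hmem2 j
      have h1 := hmem1 j
      simp only [List.map_append, ← List.append_assoc]
      rw [h2, h1]
      simp only [List.mem_cons]
      constructor
      · rintro ((h | ⟨hv, hin⟩) | ⟨hv, s, hsr, hin⟩)
        · exact Or.inl h
        · exact Or.inr ⟨hv, stop, Or.inl rfl, hin⟩
        · exact Or.inr ⟨hv, s, Or.inr hsr, hin⟩
      · rintro (h | ⟨hv, s, (rfl | hsr), hin⟩)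
        · exact Or.inl (Or.inl h)
        · exact Or.inl (Or.inr ⟨hv, hin⟩)
        · exact Or.inr ⟨hv, s, hsr, hin⟩
    · intro p hp
      rcases List.mem_append.1 hp with h | h
      · exact hhop1 p h
      · exact hhop2 p h
    · simpa [List.map_append, List.append_assoc] using hnd2
    · simpa [List.map_append, List.append_assoc] using hcl2

theorem shape_fold (sr : PySem.Dict Int (PySem.Set Int)) (hop : Int) :
    ∀ (r : List Int) (q0 : List (Int × Int)) (v sS : PySem.Set Int),
    ∃ (a : List (Int × Int)) (v' s' : PySem.Set Int),
      r.foldl (pvStepStop sr hop) (q0, v, sS) = (q0 ++ a, v', s') ∧ ∀ p ∈ a, p.2 = hop + 1 := by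
  intro r
  induction r with
  | nil => exact fun q0 v sS => ⟨[], v, sS, by simp, by simp⟩
  | cons stop rest ih =>
    intro q0 v sS
    by_cases hs : stop ∈ sS
    · obtain ⟨a, v', s', heq, hhop⟩ := ih q0 v sS
      exact ⟨a, v', s', by simpa [pvStepStop, hs] using heq, hhop⟩
    · obtain ⟨a1, heq1, _, hhop1, _⟩ := nei_fold hop (sr.getD stop PySem.Set.empty) q0 v
      obtain ⟨a2, v', s', heq2, hhop2⟩ := ih (q0 ++ a1) (v ++ a1.map (·.1)) (PySem.Set.add sS stop)
      refine ⟨a1 ++ a2, v', s', ?_, ?_⟩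
      · rw [List.foldl_cons]
        simp only [pvStepStop, if_neg hs, heq1, heq2, List.append_assoc]
      · intro p hp
        rcases List.mem_append.1 hp with h | h
        · exact hhop1 p h
        · exact hhop2 p h

theorem hit_lemma (routes : List (List Int)) (dest buses : Int) :
    ∀ (L1 : List (Int × Int)) (fuel : Nat) (L2 : List (Int × Int)) (visR visS : PySem.Set Int),
      L1.length ≤ fuel →
      (∀ p ∈ L1, p.2 = buses) →
      (∃ p ∈ L1, dest ∈ pvR routes p.1) →
      pvLoopA routes (pvSR routes) dest fuel (L1 ++ L2) visR visS = buses := by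
  intro L1
  induction L1 with
  | nil => rintro fuel L2 visR visS _ _ ⟨p, hp, _⟩; simp at hp
  | cons hd rest ih =>
    rintro fuel L2 visR visS hlen hb ⟨p, hp, hdest⟩
    obtain ⟨f, rfl⟩ : ∃ f, fuel = f + 1 := ⟨fuel - 1, by simp at hlen; omega⟩
    obtain ⟨idx, hop⟩ := hd
    by_cases hdi : dest ∈ PySem.List.pyGetD routes idx []
    · have : hop = buses := hb (idx, hop) (by simp)
      simp [pvLoopA, hdi, this]
    · have hp' : p ∈ rest := by
        rcases List.mem_cons.1 hp with rfl | h
        · exact absurd hdest hdi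
        · exact h
      obtain ⟨a, v', s', heq, _⟩ :=
        shape_fold (pvSR routes) hop (PySem.List.pyGetD routes idx []) (rest ++ L2) visR visS
      simp only [pvLoopA, List.cons_append, if_neg hdi, heq]
      rw [List.append_assoc]
      exact ih f (L2 ++ a) v' s' (by simpa using Nat.lt_succ_iff.1 (by simpa using hlen))
        (fun q hq => hb q (List.mem_cons_of_mem _ hq)) ⟨p, hp', hdest⟩

theorem level_lemma (routes : List (List Int)) (dest buses : Int) :
    ∀ (L1 : List (Int × Int)) (fuel : Nat) (L2 : List (Int × Int)) (visR visS : PySem.Set Int),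
      L1.length ≤ fuel →
      (∀ p ∈ L1, p.2 = buses ∧ dest ∉ pvR routes p.1) →
      visR.Nodup → pvClosed routes visS visR →
      ∃ (a : List (Int × Int)) (visS' : PySem.Set Int),
        pvLoopA routes (pvSR routes) dest fuel (L1 ++ L2) visR visS
          = pvLoopA routes (pvSR routes) dest (fuel - L1.length) (L2 ++ a) (visR ++ a.map (·.1)) visS' ∧
        (∀ j, j ∈ visR ++ a.map (·.1) ↔ j ∈ visR ∨ (pvValid routes j ∧ ∃ i ∈ L1.map (·.1), ∃ s ∈ pvR routes i, s ∈ pvR routes j)) ∧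
        (∀ p ∈ a, p.2 = buses + 1) ∧
        (visR ++ a.map (·.1)).Nodup ∧
        pvClosed routes visS' (visR ++ a.map (·.1)) := by
  intro L1
  induction L1 with
  | nil =>
    intro fuel L2 visR visS _ _ hnd hcl
    exact ⟨[], visS, by simp, by simp, by simp, by simpa using hnd, by simpa using hcl⟩
  | cons hd rest ih =>
    rintro fuel L2 visR visS hlen hprop hnd hcl
    obtain ⟨f, rfl⟩ : ∃ f, fuel = f + 1 := ⟨fuel - 1, by simp at hlen; omega⟩
    obtain ⟨idx, hop⟩ := hd
    obtain ⟨hb, hdi⟩ := hprop (idx, hop) (by simp)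
    simp only at hb
    subst hb
    obtain ⟨a1, visS1, heq1, hmem1, hhop1, hnd1, hcl1⟩ :=
      proc_route routes hop (pvR routes idx) (rest ++ L2) visR visS hnd hcl
    obtain ⟨a2, visS2, heq2, hmem2, hhop2, hnd2, hcl2⟩ :=
      ih f (L2 ++ a1) (visR ++ a1.map (·.1)) visS1 (by simp at hlen; omega)
        (fun p hp => hprop p (List.mem_cons_of_mem _ hp)) hnd1 hcl1
    refine ⟨a1 ++ a2, visS2, ?_, ?_, ?_, ?_, ?_⟩
    · have hdi' : dest ∉ PySem.List.pyGetD routes idx [] := hdi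
      have heq1' : (PySem.List.pyGetD routes idx []).foldl (pvStepStop (pvSR routes) hop) (rest ++ L2, visR, visS)
          = (rest ++ (L2 ++ a1), visR ++ a1.map (·.1), visS1) := by
        rw [show PySem.List.pyGetD routes idx [] = pvR routes idx from rfl, heq1, List.append_assoc]
      simp only [pvLoopA, List.cons_append, if_neg hdi', heq1']
      rw [heq2]
      simp only [List.length_cons, Nat.add_sub_add_right, List.map_append, List.append_assoc]
    · intro j
      have h2 := hmem2 j
      have h1 := hmem1 j
      simp only [List.map_append, ← List.append_assoc]
      rw [h2, h1]
      simp only [List.map_cons, List.mem_cons]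
      constructor
      · rintro ((h | ⟨hv, hin⟩) | ⟨hv, i, hir, hin⟩)
        · exact Or.inl h
        · exact Or.inr ⟨hv, idx, Or.inl rfl, hin⟩
        · exact Or.inr ⟨hv, i, Or.inr hir, hin⟩
      · rintro (h | ⟨hv, i, (rfl | hir), hin⟩)
        · exact Or.inl (Or.inl h)
        · exact Or.inl (Or.inr ⟨hv, hin⟩)
        · exact Or.inr ⟨hv, i, hir, hin⟩
    · intro p hp
      rcases List.mem_append.1 hp with h | h
      · exact hhop1 p h
      · exact hhop2 p h
    · simpa [List.map_append, List.append_assoc] using hnd2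
    · simpa [List.map_append, List.append_assoc] using hcl2

theorem card_valid (routes : List (List Int)) (l : List Int) (hnd : l.Nodup)
    (hv : ∀ j ∈ l, pvValid routes j) : l.length ≤ routes.length := by
  have hs : l ⊆ PySem.List.pyRange 0 routes.length 1 := by
    intro j hj
    obtain ⟨k, hk, rfl⟩ := hv j hj
    exact PySem.List.mem_pyRange_one.2 ⟨by positivity, by exact_mod_cast hk⟩
  calc l.length = l.toFinset.card := (List.toFinset_card_of_nodup hnd).symm
    _ ≤ (PySem.List.pyRange 0 routes.length 1).toFinset.card :=
        Finset.card_le_card (fun x hx => List.mem_toFinset.2 (hs (List.mem_toFinset.1 hx)))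
    _ ≤ (PySem.List.pyRange 0 routes.length 1).length := List.toFinset_card_le _
    _ = routes.length := by
        rw [PySem.List.length_pyRange_one]
        omega

theorem mem_enumFilterMap (routes : List (List Int)) (P : Int × List Int → Bool) (j : Int) :
    j ∈ ((PySem.List.enumerate routes 0).filter P).map (·.1) ↔
      pvValid routes j ∧ P (j, pvR routes j) = true := by
  simp only [List.mem_map, List.mem_filter]
  constructor
  · rintro ⟨p, ⟨hpe, hP⟩, rfl⟩
    obtain ⟨k, hk, rfl⟩ := (PySem.List.mem_enumerate_iff _ _ _).1 hpe
    refine ⟨⟨k, hk, by simp⟩, ?_⟩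
    simpa [pvR, PySem.List.pyGetD_natCast, List.getD, hk] using hP
  · rintro ⟨⟨k, hk, rfl⟩, hP⟩
    refine ⟨((k : Int), routes[k]), ⟨(PySem.List.mem_enumerate_iff _ _ _).2 ⟨k, hk, by simp⟩, ?_⟩, rfl⟩
    simpa [pvR, PySem.List.pyGetD_natCast, List.getD, hk] using hP

theorem nodup_enumFilterMap (routes : List (List Int)) (P : Int × List Int → Bool) :
    (((PySem.List.enumerate routes 0).filter P).map (·.1)).Nodup := by
  apply List.Nodup.map_on
  · intro x hx y hy hxy
    have hp : ∀ p ∈ (PySem.List.enumerate routes 0).filter P,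
        ∃ (k : Nat) (h : k < routes.length), p = ((k : Int), routes[k]) := by
      intro p hpf
      obtain ⟨k, hk, hpk⟩ := (PySem.List.mem_enumerate_iff _ _ _).1 (List.mem_of_mem_filter hpf)
      exact ⟨k, hk, by simpa using hpk⟩
    obtain ⟨kx, hkx, rfl⟩ := hp x hx
    obtain ⟨ky, hky, rfl⟩ := hp y hy
    simp only at hxy
    have : kx = ky := by exact_mod_cast hxy
    subst this
    rfl
  · exact (List.Pairwise.filter _ (PySem.List.pairwise_lt_enumerate routes 0)).imp
      (fun h heq => absurd (congrArg Prod.fst heq) (ne_of_lt h))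

theorem mem_pvNext (routes : List (List Int)) (frontier seen : List Int) (j : Int) :
    j ∈ pvNext routes frontier seen ↔
      pvValid routes j ∧ j ∉ seen ∧ ∃ i ∈ frontier, ∃ s ∈ pvR routes i, s ∈ pvR routes j := by
  unfold pvNext
  rw [mem_enumFilterMap]
  simp [pvR]

theorem nodup_pvNext (routes : List (List Int)) (frontier seen : List Int) :
    (pvNext routes frontier seen).Nodup := nodup_enumFilterMap routes _

theorem out_lemma (routes : List (List Int)) (dest : Int) :
    ∀ (f : Nat) (F seen : List Int) (q : List (Int × Int)) (visR visS : PySem.Set Int)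
      (buses : Int) (fuelA : Nat),
      (∀ j, j ∈ q.map (·.1) ↔ j ∈ F) →
      (∀ p ∈ q, p.2 = buses) →
      (∀ j, j ∈ visR ↔ j ∈ seen) →
      visR.Nodup → seen.Nodup →
      (∀ j ∈ visR, pvValid routes j) →
      pvClosed routes visS visR →
      q.length + (routes.length - visR.length) ≤ fuelA →
      (F ≠ [] → routes.length - seen.length < f) →
      pvLoopA routes (pvSR routes) dest fuelA q visR visS = pvLoopB routes dest f F seen buses := by
  intro f
  induction f with
  | zero =>
    intro F seen q visR visS buses fuelA h1 h2 h3 h4 h5 h6 h7 h8 h9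
    have hF : F = [] := by
      by_contra h
      exact absurd (h9 h) (by omega)
    subst hF
    have hq : q = [] := by
      cases q with
      | nil => rfl
      | cons p rest => exact absurd ((h1 p.1).1 (by simp)) (by simp)
    subst hq
    cases fuelA <;> simp [pvLoopA, pvLoopB]
  | succ fB ih =>
    intro F seen q visR visS buses fuelA h1 h2 h3 h4 h5 h6 h7 h8 h9
    by_cases hF : F = []
    · subst hF
      have hq : q = [] := by
        cases q with
        | nil => rfl
        | cons p rest => exact absurd ((h1 p.1).1 (by simp)) (by simp)
      subst hq
      cases fuelA <;> simp [pvLoopA, pvLoopB]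
    · have hBne : F.isEmpty = false := by simpa [List.isEmpty_iff] using hF
      by_cases hdest : ∃ i ∈ F, dest ∈ pvR routes i
      · have hBany : F.any (fun i => decide (dest ∈ PySem.List.pyGetD routes i [])) = true := by
          obtain ⟨i, hi, hdi⟩ := hdest
          exact List.any_eq_true.2 ⟨i, hi, by simpa [pvR] using hdi⟩
        rw [show pvLoopB routes dest (fB + 1) F seen buses = buses by
          simp [pvLoopB, hBne, hBany]]
        obtain ⟨i, hi, hdi⟩ := hdest
        obtain ⟨p, hp, rfl⟩ := List.mem_map.1 ((h1 i).2 hi)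
        rw [show q = q ++ [] by simp]
        exact hit_lemma routes dest buses q fuelA [] visR visS (by omega) h2 ⟨p, hp, hdi⟩
      · have hBany : F.any (fun i => decide (dest ∈ PySem.List.pyGetD routes i [])) = false := by
          rw [List.any_eq_false]
          intro i hi
          simpa [pvR] using fun hdi => hdest ⟨i, hi, by simpa [pvR] using hdi⟩
        rw [show pvLoopB routes dest (fB + 1) F seen buses
            = pvLoopB routes dest fB (pvNext routes F seen) (seen ++ pvNext routes F seen) (buses + 1) by
          simp [pvLoopB, hBne, hBany]]
        obtain ⟨a, visS', heqA, hmemA, hhopA, hndA, hclA⟩ :=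
          level_lemma routes dest buses q fuelA [] visR visS (by omega)
            (fun p hp => ⟨h2 p hp, fun hdi => hdest ⟨p.1, (h1 p.1).1 (List.mem_map.2 ⟨p, hp, rfl⟩), hdi⟩⟩)
            h4 h7
        rw [show q = q ++ [] by simp, heqA]
        simp only [List.nil_append]
        -- disjointness of visR and a.map fst from Nodup of the append
        have hdisj : ∀ j ∈ a.map (·.1), j ∉ visR := by
          intro j hj hjv
          exact (List.disjoint_of_nodup_append hndA) hjv hj
        have hvalid' : ∀ j ∈ visR ++ a.map (·.1), pvValid routes j := by
          intro j hj
          rcases (hmemA j).1 hj with h | ⟨hv, _⟩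
          · exact h6 j h
          · exact hv
        have hmemaf : ∀ j, j ∈ a.map (·.1) ↔ j ∈ pvNext routes F seen := by
          intro j
          rw [mem_pvNext]
          constructor
          · intro hj
            rcases (hmemA j).1 (List.mem_append_right _ hj) with h | ⟨hv, i, hiq, s, hsi, hsj⟩
            · exact absurd h (hdisj j hj)
            · exact ⟨hv, fun hjs => hdisj j hj ((h3 j).2 hjs), i, (h1 i).1 hiq, s, hsi, hsj⟩
          · rintro ⟨hv, hjs, i, hiF, s, hsi, hsj⟩
            have : j ∈ visR ++ a.map (·.1) :=
              (hmemA j).2 (Or.inr ⟨hv, i, (h1 i).2 hiF, s, hsi, hsj⟩)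
            rcases List.mem_append.1 this with h | h
            · exact absurd ((h3 j).1 h) hjs
            · exact h
        have hseenval : ∀ j ∈ seen, pvValid routes j := fun j hj => h6 j ((h3 j).2 hj)
        have hlenR : visR.length = seen.length :=
          ((List.perm_ext_iff_of_nodup h4 h5).2 h3).length_eq
        have hcard : (visR ++ a.map (·.1)).length ≤ routes.length :=
          card_valid routes _ hndA hvalid'
        have hlapp : (visR ++ a.map (·.1)).length = visR.length + a.length := by simp
        refine ih (pvNext routes F seen) (seen ++ pvNext routes F seen) a
          (visR ++ a.map (·.1)) visS' (buses + 1) (fuelA - q.length)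
          hmemaf hhopA ?_ hndA ?_ hvalid' hclA ?_ ?_
        · intro j
          rw [List.mem_append, List.mem_append, hmemaf j, ← h3 j]
        · rw [List.nodup_append]
          refine ⟨h5, nodup_pvNext routes F seen, ?_⟩
          intro j hj y hy heq
          subst heq
          exact ((mem_pvNext routes F seen j).1 hy).2.1 hj
        · omega
        · intro hne
          obtain ⟨j, hj⟩ := List.exists_mem_of_ne_nil _ hne
          obtain ⟨hv, hjs, _⟩ := (mem_pvNext routes F seen j).1 hj
          have hnx1 : 1 ≤ (pvNext routes F seen).length := List.length_pos_of_mem hj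
          have hcard2 : (seen ++ pvNext routes F seen).length ≤ routes.length := by
            apply card_valid routes _ ?_ ?_
            · rw [List.nodup_append]
              refine ⟨h5, nodup_pvNext routes F seen, ?_⟩
              intro x hx y hy heq
              subst heq
              exact ((mem_pvNext routes F seen x).1 hy).2.1 hx
            · intro x hx
              rcases List.mem_append.1 hx with h | h
              · exact hseenval x h
              · exact ((mem_pvNext routes F seen x).1 h).1
          have hseenlt : seen.length + 1 ≤ routes.length := by
            have : (seen ++ [j]).length ≤ routes.length := by
              apply card_valid routes _ ?_ ?_
              · rw [List.nodup_append]
                exact ⟨h5, List.nodup_singleton j, by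
                  intro x hx y hy heq
                  rw [List.mem_singleton] at hy
                  subst hy
                  subst heq
                  exact hjs hx⟩
              · intro x hx
                rcases List.mem_append.1 hx with h | h
                · exact hseenval x h
                · rw [List.mem_singleton] at h
                  subst h
                  exact hv
            simpa using this
          have h9' := h9 hF
          simp only [List.length_append] at hcard2 ⊢
          omega

theorem min_hops_eq (n : Int) (routes : List (List Int)) (source dest : Int) :
    min_hops n routes source dest = min_hops_alt n routes source dest := by
  unfold min_hops min_hops_alt
  by_cases hsd : source = dest
  · simp [hsd]
  · simp only [if_neg hsd]
    rw [init_fold _ (nodup_pvSR routes source)]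
    set l := (pvSR routes).getD source PySem.Set.empty with hl
    set F := ((PySem.List.enumerate routes 0).filter (fun p => decide (source ∈ p.2))).map (·.1) with hF
    have hmemF : ∀ j, j ∈ F ↔ pvValid routes j ∧ source ∈ pvR routes j := by
      intro j
      rw [hF, mem_enumFilterMap]
      simp [pvR]
    have hmemL : ∀ j, j ∈ l ↔ j ∈ F := by
      intro j
      rw [hmemF, hl, mem_pvSR]
    have hndl : l.Nodup := nodup_pvSR routes source
    have hvl : ∀ j ∈ l, pvValid routes j := fun j hj => ((mem_pvSR routes source j).1 hj).1
    have hcl : l.length ≤ routes.length := card_valid routes l hndl hvl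
    apply out_lemma routes dest routes.length F F (l.map (fun i => (i, (1 : Int)))) l
      PySem.Set.empty 1 routes.length
    · intro j
      rw [List.map_map]
      simpa using hmemL j
    · intro p hp
      obtain ⟨i, _, rfl⟩ := List.mem_map.1 hp
      rfl
    · exact hmemL
    · exact hndl
    · exact hF ▸ nodup_enumFilterMap routes _
    · exact hvl
    · intro s j hs
      simp [PySem.Set.empty] at hs
    · simp only [List.length_map]
      omega
    · intro hne
      obtain ⟨j, hj⟩ := List.exists_mem_of_ne_nil _ hne
      obtain ⟨⟨k, hk, _⟩, _⟩ := (hmemF j).1 hj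
      have : 1 ≤ F.length := List.length_pos_of_mem hj
      have : l.length = F.length := ((List.perm_ext_iff_of_nodup hndl (hF ▸ nodup_enumFilterMap routes _)).2 hmemL).length_eq
      omega

-- ===== VERDICT (by name: the statement is the Claim_ definition above) =====
theorem min_hops_spec : Claim_equal_min_hops := by
  intro n routes source dest _
  show min_hops n routes source dest = min_hops_alt n routes source dest
  exact min_hops_eq n routes source dest
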